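-- pv_equiv track=rewrite | github.com/TLaborde/Aoc2023 | 2023_14.py | part2
-- ===== SOURCE A (Python) =====
-- from itertools import chain
--
-- def transpose(matrix):
--     return ["".join([str(matrix[i][j]) for i in range(len(matrix))]) for j in range(len(matrix[0]))]
--
-- def calculate_weight(data):
--     """Solve part 1."""
--     rows = transpose(data)
--     total_weight = 0
--     for row in rows:
--         row = list(row)
--         for i, cell in enumerate(row):
--             if cell == "O":
--                 total_weight += len(row) - i
--
--     return total_weight
--
-- def m_transpose(matrix):
--     return [[matrix[i][j] for i in range(len(matrix))] for j in range(len(matrix[0]))]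
--
-- def roll(data):
--     for row in data:
--         for i, cell in enumerate(row):
--             if cell == "#":
--                 continue
--             if cell == "O":
--                 j = i - 1
--                 while j >= 0 and row[j] == ".":
--                     row[j], row[j+1] = row[j+1], row[j]
--                     j -= 1
--     return data
--
-- def do_cycle(data):
--     north = m_transpose(data)
--     north = roll(north)
--     north = m_transpose(north)
--     west = roll(north)
--     south = list(reversed(west))
--     south = m_transpose(south)
--     south = roll(south)
--     south = m_transpose(south)
--     south = list(reversed(south))
--     east = [list(reversed(r)) for r in south]
--     east = roll(east)
--     east = [list(reversed(r)) for r in east]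
--     return east
--
-- def part2(data):
--     """Solve part 2."""
--     data = [list(row) for row in data]
--     previous = []
--     result = ""
--     for _ in range(1000000000):
--         data = do_cycle(data)
--         result = "".join(chain(*data))
--         if result in previous:
--             cycle_begin_index = previous.index(result)
--             cycle_length = len(previous) - cycle_begin_index
--             final_index = ((1000000000 - cycle_begin_index) %
--                            cycle_length) + cycle_begin_index - 1
--             result = previous[final_index]
--             break
--         else:
--             previous.append(result)
--
--     s = [result[i:i+len(data[0])] for i in range(0, len(result), len(data[0]))]
--     weight = calculate_weight(s)
--
--     return weight
-- ===== SOURCE B (Python) =====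
-- def _roll_row(row):
--     # gravity pass: count '.'s; an 'O' is emitted before the pending dots; any
--     # other character is a wall that flushes the pending dots.
--     out = []
--     dots = 0
--     for c in row:
--         if c == ".":
--             dots += 1
--         elif c == "O":
--             out.append("O")
--         else:
--             out.extend(["."] * dots)
--             out.append(c)
--             dots = 0
--     out.extend(["."] * dots)
--     return out
--
--
-- def _transpose(m):
--     return [[m[i][j] for i in range(len(m))] for j in range(len(m[0]))]
--
--
-- def _cycle(grid):
--     g = _transpose(grid)
--     g = [_roll_row(r) for r in g]          # north
--     g = _transpose(g)
--     g = [_roll_row(r) for r in g]          # west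
--     g = _transpose(list(reversed(g)))
--     g = [_roll_row(r) for r in g]          # south
--     g = list(reversed(_transpose(g)))
--     g = [list(reversed(_roll_row(list(reversed(r))))) for r in g]   # east
--     return g
--
--
-- def _north_load(grid, n):
--     return sum((n - r) * row.count("O") for r, row in enumerate(grid))
--
--
-- def part2(data):
--     """Solve part 2."""
--     grid = [list(row) for row in data]
--     n = len(grid)
--     seen = {}
--     weights = []
--     for step in range(1000000000):
--         grid = _cycle(grid)
--         key = "".join("".join(r) for r in grid)
--         if key in seen:
--             cbi = seen[key]
--             cl = len(weights) - cbi
--             fi = ((1000000000 - cbi) % cl) + cbi - 1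
--             return weights[fi]
--         seen[key] = step
--         weights.append(_north_load(grid, n))
--     return _north_load(grid, n)
-- ===== Notes on version B (the rewrite author's own statement) =====
-- stated objective: alternative
-- what changed: Each directional roll is a single gravity pass per line (count pending '.'s, emit 'O's before them, walls flush them) instead of bubbling every stone left with adjacent swaps, and the cycle loop keeps a dict of seen states plus the precomputed load of every state instead of scanning a list with 'in'/'.index' and re-splitting a joined string at the end.
import Mathlib
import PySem

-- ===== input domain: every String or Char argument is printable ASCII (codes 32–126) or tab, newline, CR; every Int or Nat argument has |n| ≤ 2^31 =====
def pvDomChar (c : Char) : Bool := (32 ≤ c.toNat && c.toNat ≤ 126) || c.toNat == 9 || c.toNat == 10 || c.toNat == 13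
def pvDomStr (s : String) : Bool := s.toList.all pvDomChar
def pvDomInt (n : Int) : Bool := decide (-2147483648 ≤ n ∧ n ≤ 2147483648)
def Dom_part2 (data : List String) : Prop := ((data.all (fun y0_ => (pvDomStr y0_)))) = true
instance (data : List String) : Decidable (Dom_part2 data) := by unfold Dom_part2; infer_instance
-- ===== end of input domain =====

-- B replaces A's per-stone bubble swaps by a one-pass gravity scan per line and keeps a dict of
-- seen states with the load of each state, instead of re-scanning a list of states and re-splitting
-- a string at the end; the equivalence is about the return value (A mutates only its local lists).

-- ===== PORT A =====
-- grids are ported as List (List Char); a row string and its list of chars are ported identically;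
-- matrix[i][j] indices are in range wherever Python does not raise (Pre_), so getD is exact there

def mTransposeA (m : List (List Char)) : List (List Char) :=
  (List.range (m.headD []).length).map (fun j =>
    (List.range m.length).map (fun i => ((m.getD i []).getD j ' ')))

def transposeA (m : List (List Char)) : List (List Char) :=
  (List.range (m.headD []).length).map (fun j =>
    (List.range m.length).map (fun i => ((m.getD i []).getD j ' ')))

def calcWeightA (data : List (List Char)) : Int :=
  let rows := transposeA data
  rows.foldl (fun tw row =>
    (PySem.List.enumerate row).foldl (fun tw2 p =>
      if p.2 = 'O' then tw2 + ((row.length : Int) - p.1) else tw2) tw) 0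

-- while j >= 0 and row[j] == ".": row[j], row[j+1] = row[j+1], row[j]; j -= 1
def bubbleA (row : List Char) (j : Int) : List Char :=
  if h : 0 ≤ j ∧ PySem.List.pyGetD row j ' ' = '.' then
    bubbleA
      (PySem.List.pySetD (PySem.List.pySetD row j (PySem.List.pyGetD row (j+1) ' '))
        (j+1) (PySem.List.pyGetD row j ' '))
      (j - 1)
  else row
termination_by (j+1).toNat
decreasing_by omega

-- needed for the termination of rollRowA, which re-runs on the bubbled row
theorem bubbleA_length (row : List Char) (j : Int) : (bubbleA row j).length = row.length := by
  fun_induction bubbleA with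
  | case1 row j h ih => rw [ih]; simp [PySem.List.length_pySetD]
  | case2 => rfl

-- for i, cell in enumerate(row): … (reads the live, mutated row)
def rollRowA (row : List Char) (i : Nat) : List Char :=
  if h : i < row.length then
    let cell := row[i]
    if cell = '#' then rollRowA row (i+1)
    else if cell = 'O' then rollRowA (bubbleA row ((i : Int) - 1)) (i+1)
    else rollRowA row (i+1)
  else row
termination_by row.length - i
decreasing_by
  · omega
  · rw [bubbleA_length]; omega
  · omega

def rollA (data : List (List Char)) : List (List Char) :=
  data.map (fun row => rollRowA row 0)

def doCycleA (data : List (List Char)) : List (List Char) :=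
  let north := mTransposeA data
  let north := rollA north
  let north := mTransposeA north
  let west := rollA north
  let south := west.reverse
  let south := mTransposeA south
  let south := rollA south
  let south := mTransposeA south
  let south := south.reverse
  let east := south.map List.reverse
  let east := rollA east
  east.map List.reverse

def part2LoopA : List (List Char) → List (List Char) → List Char → Nat → List Char × List (List Char)
  | data, _previous, result, 0 => (result, data)
  | data, previous, _result, fuel+1 =>
    let data' := doCycleA data
    let result' := data'.flatten
    if result' ∈ previous then
      let cbi : Int := ((PySem.List.index? previous result').getD 0 : Nat)
      let cl : Int := (previous.length : Int) - cbi
      let fi : Int := PySem.Int.mod (1000000000 - cbi) cl + cbi - 1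
      (PySem.List.pyGetD previous fi [], data')
    else part2LoopA data' (previous ++ [result']) result' fuel

def part2 (data : List String) : Int :=
  let d := data.map String.toList
  let r := part2LoopA d [] [] 1000000000
  let result := r.1
  let dataF := r.2
  let w := (dataF.headD []).length
  let s := (PySem.List.pyRange 0 (result.length : Int) (w : Int)).map
      (fun i => PySem.List.slice result (some i) (some (i + (w : Int))))
  calcWeightA s

-- ===== PORT B =====

-- gravity pass: pending '.'s are counted; an 'O' is emitted before them; other chars flush them
def rollRowBgo : List Char → List Char → Nat → List Char
  | [], out, dots => out ++ List.replicate dots '.'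
  | c :: t, out, dots =>
    if c = '.' then rollRowBgo t out (dots+1)
    else if c = 'O' then rollRowBgo t (out ++ ['O']) dots
    else rollRowBgo t (out ++ List.replicate dots '.' ++ [c]) 0

def rollRowB (row : List Char) : List Char := rollRowBgo row [] 0

def mTransposeB (m : List (List Char)) : List (List Char) :=
  (List.range (m.headD []).length).map (fun j =>
    (List.range m.length).map (fun i => ((m.getD i []).getD j ' ')))

def cycleB (grid : List (List Char)) : List (List Char) :=
  let g := mTransposeB grid
  let g := g.map rollRowB
  let g := mTransposeB g
  let g := g.map rollRowB
  let g := mTransposeB g.reverse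
  let g := g.map rollRowB
  let g := (mTransposeB g).reverse
  g.map (fun r => (rollRowB r.reverse).reverse)

def northLoadB (grid : List (List Char)) (n : Int) : Int :=
  ((PySem.List.enumerate grid).map (fun p => (n - p.1) * (p.2.count 'O' : Int))).sum

def part2LoopB (n : Int) : List (List Char) → PySem.Dict (List Char) Int → List Int → Int → Nat → Int
  | grid, _seen, _weights, _step, 0 => northLoadB grid n
  | grid, seen, weights, step, fuel+1 =>
    let grid' := cycleB grid
    let key := grid'.flatten
    match seen.get? key with
    | some cbi =>
      let cl : Int := (weights.length : Int) - cbi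
      let fi : Int := PySem.Int.mod (1000000000 - cbi) cl + cbi - 1
      PySem.List.pyGetD weights fi 0
    | none =>
      part2LoopB n grid' (seen.insert key step) (weights ++ [northLoadB grid' n]) (step + 1) fuel

def part2_alt (data : List String) : Int :=
  let grid := data.map String.toList
  let n : Int := grid.length
  part2LoopB n grid PySem.Dict.empty [] 0 1000000000

-- ===== PRECONDITION & SPEC =====
-- Pre_: A raises (IndexError/ValueError in the transposes and the final chunking) exactly on the
-- empty grid, a first row of width 0, or a later row shorter than the first row; inside Pre_ A
-- always returns.
def Pre_part2 (data : List String) : Prop :=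
  data ≠ [] ∧ 0 < (data.headD "").length ∧ ∀ s ∈ data, (data.headD "").length ≤ s.length

set_option maxHeartbeats 1000000 in

instance (data : List String) : Decidable (Pre_part2 data) := by unfold Pre_part2; infer_instance

def pvWitness_part2 : List String := ["O.", "#O"]

def Spec_part2 (data : List String) (out : Int) : Prop := out = part2_alt data
instance (data : List String) (out : Int) : Decidable (Spec_part2 data out) := by unfold Spec_part2; infer_instance

-- ===== CLAIM (what is proved, stated in full; the proofs are below) =====
def Claim_equal_part2 : Prop := ∀ (data : List String), Dom_part2 data → Pre_part2 data → Spec_part2 data (part2 data)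

-- ===== LEMMAS AND PROOFS =====

theorem getD_mid (Q : List Char) (c : Char) (r : List Char) (d : Char) :
    PySem.List.pyGetD (Q ++ c :: r) (Q.length : Int) d = c := by
  simp [PySem.List.pyGetD_natCast, List.getD_eq_getElem?_getD]

theorem setD_mid (Q : List Char) (c : Char) (r : List Char) (v : Char) :
    PySem.List.pySetD (Q ++ c :: r) (Q.length : Int) v = Q ++ v :: r := by
  simp [PySem.List.pySetD_natCast, List.set_append_right]

theorem bubble_spec : ∀ (d : Nat) (P rest : List Char), (∀ c, P.getLast? = some c → c ≠ '.') →
    bubbleA (P ++ List.replicate d '.' ++ 'O' :: rest) (((P.length + d : Nat) : Int) - 1)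
      = P ++ 'O' :: (List.replicate d '.' ++ rest) := by
  intro d
  induction d with
  | zero =>
    intro P rest hP
    rcases P.eq_nil_or_concat with rfl | ⟨Q, a, rfl⟩
    · rw [bubbleA]; simp
    · have ha : a ≠ '.' := hP a (by simp)
      have hrow : (Q.concat a) ++ List.replicate 0 '.' ++ 'O' :: rest = Q ++ a :: 'O' :: rest := by
        simp
      have hidx : ((((Q.concat a).length + 0 : Nat) : Int)) - 1 = (Q.length : Int) := by
        simp
      rw [bubbleA, hrow, hidx, dif_neg]
      · simp
      · rw [getD_mid]
        exact fun hh => ha hh.2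
  | succ d ih =>
    intro P rest hP
    have hrow : P ++ List.replicate (d+1) '.' ++ 'O' :: rest
        = (P ++ List.replicate d '.') ++ '.' :: 'O' :: rest := by
      simp [List.replicate_succ']
    have hidx : (((P.length + (d+1) : Nat) : Int)) - 1 = ((P ++ List.replicate d '.').length : Int) := by
      simp; ring
    rw [bubbleA, hrow, hidx, dif_pos]
    · have h1 : PySem.List.pyGetD ((P ++ List.replicate d '.') ++ '.' :: 'O' :: rest)
          (((P ++ List.replicate d '.').length : Int) + 1) ' ' = 'O' := by
        have h : (P ++ List.replicate d '.') ++ '.' :: 'O' :: rest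
            = ((P ++ List.replicate d '.') ++ ['.']) ++ 'O' :: rest := by simp
        rw [h]
        have hl : (((P ++ List.replicate d '.').length : Int) + 1)
            = (((P ++ List.replicate d '.') ++ ['.']).length : Int) := by simp; ring
        rw [hl, getD_mid]
      rw [getD_mid, h1, setD_mid]
      have h2 : (P ++ List.replicate d '.') ++ 'O' :: 'O' :: rest
          = ((P ++ List.replicate d '.') ++ ['O']) ++ 'O' :: rest := by simp
      have hl2 : (((P ++ List.replicate d '.').length : Int) + 1)
          = ((((P ++ List.replicate d '.') ++ ['O']).length : Nat) : Int) := by simp; ring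
      rw [h2, hl2, setD_mid]
      have h3 : ((P ++ List.replicate d '.') ++ ['O']) ++ '.' :: rest
          = P ++ List.replicate d '.' ++ 'O' :: '.' :: rest := by simp
      rw [h3]
      have h5 : ((P ++ List.replicate d '.').length : Int) - 1 = (((P.length + d : Nat) : Int)) - 1 := by
        simp
      rw [h5, ih P ('.' :: rest) hP]
      simp [List.replicate_succ']
    · constructor
      · simp; omega
      · rw [getD_mid]

theorem roll_aux : ∀ (rest P : List Char) (d : Nat), (∀ c, P.getLast? = some c → c ≠ '.') →
    rollRowA (P ++ List.replicate d '.' ++ rest) (P.length + d) = rollRowBgo rest P d := by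
  intro rest
  induction rest with
  | nil =>
    intro P d hP
    rw [rollRowA, dif_neg]
    · simp [rollRowBgo]
    · simp
  | cons c t ih =>
    intro P d hP
    have hlen : P.length + d < (P ++ List.replicate d '.' ++ c :: t).length := by simp
    have hcell : (P ++ List.replicate d '.' ++ c :: t)[P.length + d]'hlen = c := by
      simp
    rw [rollRowA, dif_pos hlen]
    simp only [hcell]
    by_cases hc1 : c = '#'
    · subst hc1
      have hr : rollRowBgo ('#' :: t) P d = rollRowBgo t (P ++ List.replicate d '.' ++ ['#']) 0 := by
        simp [rollRowBgo]
      rw [if_pos rfl, hr]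
      have h : P ++ List.replicate d '.' ++ '#' :: t
          = (P ++ List.replicate d '.' ++ ['#']) ++ List.replicate 0 '.' ++ t := by simp
      have h2 : P.length + d + 1 = (P ++ List.replicate d '.' ++ ['#']).length + 0 := by
        simp; omega
      rw [h, h2, ih _ 0 (by simp)]
    · rw [if_neg hc1]
      by_cases hc2 : c = 'O'
      · subst hc2
        have hr : rollRowBgo ('O' :: t) P d = rollRowBgo t (P ++ ['O']) d := by
          simp [rollRowBgo]
        rw [if_pos rfl, hr, bubble_spec d P t hP]
        have h : P ++ 'O' :: (List.replicate d '.' ++ t)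
            = (P ++ ['O']) ++ List.replicate d '.' ++ t := by simp
        have h2 : P.length + d + 1 = (P ++ ['O']).length + d := by simp; omega
        rw [h, h2, ih _ d (by simp)]
      · rw [if_neg hc2]
        by_cases hc3 : c = '.'
        · subst hc3
          have hr : rollRowBgo ('.' :: t) P d = rollRowBgo t P (d+1) := by
            simp [rollRowBgo]
          rw [hr]
          have h : P ++ List.replicate d '.' ++ '.' :: t
              = P ++ List.replicate (d+1) '.' ++ t := by simp [List.replicate_succ']
          have h2 : P.length + d + 1 = P.length + (d+1) := by omega
          rw [h, h2, ih _ (d+1) hP]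
        · have hr : rollRowBgo (c :: t) P d
              = rollRowBgo t (P ++ List.replicate d '.' ++ [c]) 0 := by
            simp [rollRowBgo, hc2, hc3]
          rw [hr]
          have h : P ++ List.replicate d '.' ++ c :: t
              = (P ++ List.replicate d '.' ++ [c]) ++ List.replicate 0 '.' ++ t := by simp
          have h2 : P.length + d + 1 = (P ++ List.replicate d '.' ++ [c]).length + 0 := by
            simp; omega
          rw [h, h2, ih _ 0 (by simp [hc3])]

theorem rollRow_eq (row : List Char) : rollRowA row 0 = rollRowBgo row [] 0 := by
  have := roll_aux row [] 0 (by simp)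
  simpa using this

def Rect (n w : Nat) (g : List (List Char)) : Prop :=
  g.length = n ∧ ∀ r ∈ g, r.length = w

theorem rollRowA_length (row : List Char) (i : Nat) : (rollRowA row i).length = row.length := by
  fun_induction rollRowA
  all_goals first
    | rfl
    | (rename_i ih; exact ih)
    | (rename_i ih; rw [ih, bubbleA_length])

theorem headD_of_rect {n w : Nat} {g : List (List Char)} (h : Rect n w g) (hn : 0 < n) :
    (g.headD []).length = w := by
  obtain ⟨h1, h2⟩ := h
  cases g with
  | nil => simp at h1; omega
  | cons r t => exact h2 r (by simp)

theorem mT_shape (m : List (List Char)) :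
    Rect (m.headD []).length m.length (mTransposeA m) := by
  constructor
  · simp [mTransposeA]
  · intro r hr
    simp [mTransposeA] at hr
    obtain ⟨j, _, rfl⟩ := hr
    simp

theorem rollA_rect {n w : Nat} {g : List (List Char)} (h : Rect n w g) : Rect n w (rollA g) := by
  obtain ⟨h1, h2⟩ := h
  constructor
  · simp [rollA, h1]
  · intro r hr
    simp [rollA] at hr
    obtain ⟨r0, hr0, rfl⟩ := hr
    rw [rollRowA_length]
    exact h2 r0 hr0

theorem reverse_rect {n w : Nat} {g : List (List Char)} (h : Rect n w g) : Rect n w g.reverse := by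
  obtain ⟨h1, h2⟩ := h
  exact ⟨by simp [h1], fun r hr => h2 r (by simpa using hr)⟩

theorem mapRev_rect {n w : Nat} {g : List (List Char)} (h : Rect n w g) :
    Rect n w (g.map List.reverse) := by
  obtain ⟨h1, h2⟩ := h
  constructor
  · simp [h1]
  · intro r hr
    rw [List.mem_map] at hr
    obtain ⟨r0, hr0, rfl⟩ := hr
    simp [h2 r0 hr0]

theorem mT_rect {n w : Nat} {g : List (List Char)} (h : Rect n w g) (hn : 0 < n) :
    Rect w n (mTransposeA g) := by
  have := mT_shape g
  rwa [headD_of_rect h hn, h.1] at this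

theorem doCycle_rect {n w : Nat} (g : List (List Char)) (hn : g.length = n)
    (hw : (g.headD []).length = w) (hn0 : 0 < n) (hw0 : 0 < w) :
    Rect n w (doCycleA g) := by
  have r1 : Rect w n (mTransposeA g) := by have := mT_shape g; rwa [hw, hn] at this
  have r2 := rollA_rect r1
  have r3 : Rect n w (mTransposeA (rollA (mTransposeA g))) := mT_rect r2 hw0
  have r4 := rollA_rect r3
  have r5 := reverse_rect r4
  have r6 := mT_rect r5 hn0
  have r7 := rollA_rect r6
  have r8 := mT_rect r7 hw0
  have r9 := reverse_rect r8
  have r10 := mapRev_rect r9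
  have r11 := rollA_rect r10
  have r12 := mapRev_rect r11
  exact r12

def chunkOf (s : List Char) (w : Nat) : List (List Char) :=
  (PySem.List.pyRange 0 (s.length : Int) (w : Int)).map
    (fun i => PySem.List.slice s (some i) (some (i + (w : Int))))

theorem flatten_drop {w : Nat} : ∀ (g : List (List Char)) (k : Nat), (∀ r ∈ g, r.length = w) →
    (g.flatten).drop (w * k) = (g.drop k).flatten := by
  intro g
  induction g with
  | nil => simp
  | cons r t ih =>
    intro k hk
    cases k with
    | zero => simp
    | succ k' =>
      have hr : r.length = w := hk r (by simp)
      have h1 : w * (k' + 1) = w + w * k' := by ring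
      rw [h1, List.flatten_cons, ← List.drop_drop, List.drop_left' hr,
        ih k' (fun x hx => hk x (by simp [hx]))]
      simp

theorem flatten_chunk_elem {n w : Nat} (g : List (List Char)) (hg : Rect n w g) (k : Nat)
    (hk : k < n) : ((g.flatten).drop (w * k)).take w = g[k]'(by rw [hg.1]; omega) := by
  rw [flatten_drop g k hg.2]
  have hd : g.drop k = g[k]'(by rw [hg.1]; omega) :: g.drop (k+1) := by
    exact List.drop_eq_getElem_cons (by rw [hg.1]; omega)
  rw [hd, List.flatten_cons, List.take_left' (hg.2 _ (by exact List.getElem_mem _))]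

theorem chunk_flatten {n w : Nat} (g : List (List Char)) (hg : Rect n w g) (hw : 0 < w)
    (hn : 0 < n) : chunkOf g.flatten w = g := by
  have hlen : g.flatten.length = w * n := by
    rw [List.length_flatten]
    have : g.map List.length = List.replicate n w := by
      rw [List.eq_replicate_iff]
      constructor
      · simp [hg.1]
      · intro b hb
        rw [List.mem_map] at hb
        obtain ⟨r, hr, rfl⟩ := hb
        exact hg.2 r hr
    rw [this]
    simp [Nat.mul_comm]
  have hm : ((((w * n : Nat) : Int) - 0 + (w : Int) - 1) / (w : Int)).toNat = n := by
    have h1 : (((w * n : Nat) : Int) - 0 + (w : Int) - 1) = ((w * n + w - 1 : Nat) : Int) := by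
      push_cast
      omega
    rw [h1]
    rw [← Int.natCast_div]
    have : (w * n + w - 1) / w = n := by
      have h2 : w * n + w - 1 = w * n + (w - 1) := by omega
      rw [h2, Nat.mul_add_div hw, Nat.div_eq_of_lt (by omega)]
      omega
    rw [this]
    simp
  unfold chunkOf
  rw [hlen, PySem.List.pyRange_of_pos (s := (w : Int)) 0 ((w * n : Nat) : Int) (by exact_mod_cast hw)]
  rw [if_pos (by push_cast; positivity), hm]
  apply List.ext_getElem
  · simp [hg.1]
  · intro k hk1 hk2
    simp only [List.getElem_map, List.getElem_range]
    have hcast : (0 : Int) + (w : Int) * (k : Int) = ((w * k : Nat) : Int) := by push_cast; ring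
    have hcast2 : ((w * k : Nat) : Int) + (w : Int) = ((w * k + w : Nat) : Int) := by
      push_cast; ring
    rw [hcast, hcast2, PySem.List.slice_natCast]
    have : w * k + w - w * k = w := by omega
    rw [this]
    exact flatten_chunk_elem g hg k (by simpa [hg.1] using hk2)

theorem count_as_sum (row : List Char) :
    ((List.range row.length).map (fun j => if row.getD j ' ' = 'O' then (1:Int) else 0)).sum
      = (row.count 'O' : Int) := by
  induction row with
  | nil => simp
  | cons x xs ih =>
    rw [List.length_cons, List.range_succ_eq_map, List.map_cons, List.map_map, List.sum_cons]
    have h : (List.range xs.length).map ((fun j => if (x :: xs).getD j ' ' = 'O' then (1:Int) else 0) ∘ (· + 1))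
        = (List.range xs.length).map (fun j => if xs.getD j ' ' = 'O' then (1:Int) else 0) := by
      apply List.map_congr_left
      intro j _
      simp
    rw [h, ih]
    by_cases hx : x = 'O'
    · simp [hx]; ring
    · simp [hx]

theorem inner_fold (row : List Char) (L : Int) (tw : Int) :
    (PySem.List.enumerate row).foldl (fun tw2 p => if p.2 = 'O' then tw2 + (L - p.1) else tw2) tw
      = tw + ((PySem.List.enumerate row).map (fun p => if p.2 = 'O' then L - p.1 else 0)).sum := by
  rw [PySem.List.foldl_congr_mem _ _ (fun tw2 p => tw2 + (if p.2 = 'O' then L - p.1 else 0)) _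
    (by intro acc x _; by_cases hx : x.2 = 'O' <;> simp [hx])]
  rw [PySem.List.foldl_add]

theorem sum_map_range_int (n : Nat) (f : Nat → Int) :
    ((List.range n).map f).sum = ∑ i ∈ Finset.range n, f i := by
  induction n with
  | zero => simp
  | succ m ih => rw [List.range_succ, List.map_append, List.sum_append, Finset.sum_range_succ, ih]; simp

theorem sum_enum_getD {α : Type} (xs : List α) (d : α) (f : Int × α → Int) :
    ((PySem.List.enumerate xs).map f).sum
      = ∑ i ∈ Finset.range xs.length, f ((i : Int), xs.getD i d) := by
  rw [PySem.List.enumerate_eq_map_pyRange xs d, PySem.List.len_eq, PySem.List.pyRange_zero_natCast,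
    List.map_map, List.map_map, sum_map_range_int]
  apply Finset.sum_congr rfl
  intro i _
  simp [PySem.List.pyGetD_natCast]

theorem weight_eq {n w : Nat} (g : List (List Char)) (hg : Rect n w g) (hn : 0 < n) :
    calcWeightA g = northLoadB g ((g.length : Nat) : Int) := by
  have hw : (g.headD []).length = w := headD_of_rect hg hn
  have hlen : g.length = n := hg.1
  unfold calcWeightA transposeA
  rw [hw, hlen]
  set col : Nat → List Char := fun j => (List.range n).map (fun i => (g.getD i []).getD j ' ') with hcol
  set S : List Char → Int := fun row =>
    ((PySem.List.enumerate row).map (fun p => if p.2 = 'O' then (row.length : Int) - p.1 else 0)).sum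
    with hS
  rw [PySem.List.foldl_congr_mem _ _ (fun tw row => tw + S row) _
    (by intro acc row _; exact inner_fold row _ acc)]
  rw [PySem.List.foldl_add, List.map_map, sum_map_range_int]
  simp only [zero_add]
  -- LHS now: ∑ j ∈ range w, S (col j)
  have hSc : ∀ j, S (col j) = ∑ i ∈ Finset.range n,
      (if (g.getD i []).getD j ' ' = 'O' then (n : Int) - i else 0) := by
    intro j
    have hcl : (col j).length = n := by simp [hcol]
    simp only [hS]
    rw [sum_enum_getD (col j) ' ' (fun p => if p.2 = 'O' then ((col j).length : Int) - p.1 else 0),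
      hcl]
    apply Finset.sum_congr rfl
    intro i hi
    rw [Finset.mem_range] at hi
    simp only [hcol]
    rw [PySem.List.getD_map_range _ _ _ _ hi]
  have hRHS : northLoadB g ((n : Nat) : Int) = ∑ i ∈ Finset.range n,
      ∑ j ∈ Finset.range w, (if (g.getD i []).getD j ' ' = 'O' then (n : Int) - i else 0) := by
    unfold northLoadB
    rw [sum_enum_getD g [] (fun p => (((n : Nat) : Int) - p.1) * (p.2.count 'O' : Int)), hlen]
    apply Finset.sum_congr rfl
    intro i hi
    rw [Finset.mem_range] at hi
    have hrow : (g.getD i []).length = w := by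
      apply hg.2
      rw [List.getD_eq_getElem _ _ (by omega)]
      exact List.getElem_mem _
    have hcnt : (((g.getD i []).count 'O' : Nat) : Int)
        = ∑ j ∈ Finset.range w, (if (g.getD i []).getD j ' ' = 'O' then (1 : Int) else 0) := by
      rw [← count_as_sum (g.getD i []), hrow, sum_map_range_int]
    simp only []
    rw [hcnt, Finset.mul_sum]
    apply Finset.sum_congr rfl
    intro j _
    by_cases hE : (g.getD i []).getD j ' ' = 'O'
    · rw [if_pos hE, if_pos hE]; ring
    · rw [if_neg hE, if_neg hE]; ring
  rw [hRHS, Finset.sum_comm]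
  apply Finset.sum_congr rfl
  intro j _
  rw [Function.comp_apply]
  exact hSc j

theorem rollA_eq (g : List (List Char)) : rollA g = g.map rollRowB := by
  unfold rollA
  apply List.map_congr_left
  intro r _
  rw [rollRow_eq]
  rfl

theorem mT_eq : mTransposeB = mTransposeA := rfl

theorem doCycle_eq (g : List (List Char)) : doCycleA g = cycleB g := by
  unfold doCycleA cycleB
  rw [mT_eq]
  simp only [rollA_eq, List.map_map, Function.comp_def]

def tagIdx : List (List Char) → Nat → List (List Char × Int)
  | [], _ => []
  | s :: t, k => (s, (k : Int)) :: tagIdx t (k+1)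

theorem get?_tagIdx (prev : List (List Char)) : ∀ (k : Nat) (key : List Char),
    PySem.Dict.get? ⟨tagIdx prev k⟩ key
      = (PySem.List.index? prev key).map (fun i => ((k + i : Nat) : Int)) := by
  induction prev with
  | nil => intro k key; simp [tagIdx, PySem.List.index?_eq_idxOf?, PySem.Dict.get?]
  | cons s t ih =>
    intro k key
    rw [tagIdx, PySem.Dict.get?_mk_cons]
    by_cases hs : s = key
    · subst hs
      rw [if_pos (by simp), PySem.List.index?_cons_self]
      simp
    · rw [if_neg (by simp [hs]), ih (k+1) key, PySem.List.index?_cons_of_ne _ hs]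
      cases hidx : PySem.List.index? t key with
      | none => simp
      | some i =>
        simp only [Option.map_some]
        congr 1
        omega

theorem tagIdx_append (prev : List (List Char)) : ∀ (k : Nat) (x : List Char),
    tagIdx (prev ++ [x]) k = tagIdx prev k ++ [(x, ((k + prev.length : Nat) : Int))] := by
  induction prev with
  | nil => intro k x; simp [tagIdx]
  | cons s t ih =>
    intro k x
    rw [List.cons_append, tagIdx, tagIdx, ih (k+1) x]
    have : k + 1 + t.length = k + (s :: t).length := by simp; omega
    rw [this]
    simp

theorem pyGetD_map_inrange {α β : Type} (f : α → β) (l : List α) (i : Int) (d₁ : α) (d₂ : β)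
    (h1 : -(l.length : Int) ≤ i) (h2 : i < l.length) :
    PySem.List.pyGetD (l.map f) i d₂ = f (PySem.List.pyGetD l i d₁) := by
  by_cases h0 : 0 ≤ i
  · rw [PySem.List.pyGetD_eq_getElem _ _ h0 (by simpa using h2),
      PySem.List.pyGetD_eq_getElem _ _ h0 h2, List.getElem_map]
  · have hk : i = -(((-i).toNat : Nat) : Int) := by omega
    rw [hk, PySem.List.pyGetD_neg_natCast _ _ _ (by omega) (by simp; omega),
      PySem.List.pyGetD_neg_natCast _ _ _ (by omega) (by omega)]
    simp

theorem loop_eq {n w : Nat} (hn : 0 < n) (hw : 0 < w) :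
    ∀ (fuel : Nat) (grid : List (List Char)) (prev : List (List Char)) (result : List Char)
      (seen : PySem.Dict (List Char) Int) (weights : List Int),
      Rect n w grid →
      result = grid.flatten →
      seen.items = tagIdx prev 0 →
      weights = prev.map (fun s => calcWeightA (chunkOf s w)) →
      calcWeightA (chunkOf (part2LoopA grid prev result fuel).1
          (((part2LoopA grid prev result fuel).2.headD []).length))
        = part2LoopB (n : Int) grid seen weights (prev.length : Int) fuel := by
  intro fuel
  induction fuel with
  | zero =>
    intro grid prev result seen weights hrect hres hseen hwts
    rw [part2LoopA, part2LoopB]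
    simp only []
    rw [headD_of_rect hrect hn, hres, chunk_flatten grid hrect hw hn,
      weight_eq grid hrect hn, hrect.1]
  | succ fuel ih =>
    intro grid prev result seen weights hrect hres hseen hwts
    rw [part2LoopA, part2LoopB]
    have hcyc : cycleB grid = doCycleA grid := (doCycle_eq grid).symm
    have hrect' : Rect n w (doCycleA grid) :=
      doCycle_rect grid hrect.1 (headD_of_rect hrect hn) hn hw
    have hseen' : seen = ⟨tagIdx prev 0⟩ := PySem.Dict.ext hseen
    by_cases hmem : (doCycleA grid).flatten ∈ prev
    · obtain ⟨i, hidx⟩ : ∃ i, PySem.List.index? prev ((doCycleA grid).flatten) = some i := by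
        have := (PySem.List.index?_isSome_iff prev ((doCycleA grid).flatten)).mpr hmem
        cases h : PySem.List.index? prev ((doCycleA grid).flatten) with
        | none => rw [h] at this; simp at this
        | some i => exact ⟨i, rfl⟩
      have hget : seen.get? ((doCycleA grid).flatten) = some ((i : Nat) : Int) := by
        rw [hseen', get?_tagIdx prev 0, hidx]
        norm_num
      simp only [hcyc, if_pos hmem, hget, hidx, Option.getD_some]
      obtain ⟨hilt, -, -⟩ := PySem.List.getElem_of_index?_eq_some hidx
      have hwl : weights.length = prev.length := by rw [hwts, List.length_map]
      rw [hwl]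
      set cbi : Int := ((i : Nat) : Int) with hcbi
      set cl : Int := (prev.length : Int) - cbi with hcl
      set fi : Int := PySem.Int.mod (1000000000 - cbi) cl + cbi - 1 with hfi
      have hcl0 : 0 < cl := by rw [hcl, hcbi]; omega
      have hm0 : 0 ≤ PySem.Int.mod (1000000000 - cbi) cl := PySem.Int.mod_nonneg _ hcl0
      have hmlt : PySem.Int.mod (1000000000 - cbi) cl < cl := PySem.Int.mod_lt _ hcl0
      have hfi1 : -((prev.length : Nat) : Int) ≤ fi := by
        rw [hfi]
        have : (1 : Int) ≤ (prev.length : Int) := by omega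
        omega
      have hfi2 : fi < ((prev.length : Nat) : Int) := by rw [hfi]; omega
      rw [headD_of_rect hrect' hn, hwts,
        pyGetD_map_inrange (fun s => calcWeightA (chunkOf s w)) prev fi [] 0
          (by simpa using hfi1) (by simpa using hfi2)]
    · have hget : seen.get? ((doCycleA grid).flatten) = none := by
        rw [hseen', get?_tagIdx prev 0,
          (PySem.List.index?_eq_none_iff _ _).mpr hmem]
        rfl
      simp only [hcyc, if_neg hmem, hget]
      have hcont : seen.contains ((doCycleA grid).flatten) = false := by
        rw [PySem.Dict.contains_eq_isSome_get?, hget]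
        rfl
      have hwnew : northLoadB (doCycleA grid) (n : Int)
          = calcWeightA (chunkOf ((doCycleA grid).flatten) w) := by
        rw [chunk_flatten _ hrect' hw hn, weight_eq _ hrect' hn, hrect'.1]
      have := ih (doCycleA grid) (prev ++ [(doCycleA grid).flatten]) ((doCycleA grid).flatten)
        (seen.insert ((doCycleA grid).flatten) (prev.length : Int))
        (weights ++ [northLoadB (doCycleA grid) (n : Int)])
        hrect' rfl
        (by
          rw [PySem.Dict.items_insert_of_not_contains _ _ hcont, hseen,
            tagIdx_append prev 0 ((doCycleA grid).flatten)]
          simp)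
        (by rw [hwts, List.map_append, List.map_cons, List.map_nil, hwnew])
      have harg : ((prev ++ [(doCycleA grid).flatten]).length : Int) = (prev.length : Int) + 1 := by
        simp
      rw [harg] at this
      exact this

set_option maxHeartbeats 1000000 in
theorem part2_main : ∀ (data : List String), Pre_part2 data → part2 data = part2_alt data := by
  intro data hpre
  obtain ⟨hne, hw0, hle⟩ := hpre
  set grid : List (List Char) := data.map String.toList with hgrid
  set n : Nat := data.length with hnn
  set w : Nat := (data.headD "").length with hww
  have hn : 0 < n := by
    cases data with
    | nil => exact absurd rfl hne
    | cons d t => simp [hnn]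
  have hgl : grid.length = n := by simp [hgrid, hnn]
  have hhead : (grid.headD []).length = w := by
    cases data with
    | nil => exact absurd rfl hne
    | cons d t => simp [hgrid, hww]
  have hrect1 : Rect n w (doCycleA grid) := doCycle_rect grid hgl hhead hn hw0
  have hfuel : (1000000000 : Nat) = 999999999 + 1 := rfl
  unfold part2 part2_alt
  simp only [← hgrid, hfuel]
  rw [part2LoopA, part2LoopB]
  rw [if_neg List.not_mem_nil, hgl]
  have hcyc : cycleB grid = doCycleA grid := (doCycle_eq grid).symm
  have hget0 : PySem.Dict.empty.get? ((cycleB grid).flatten) = (none : Option Int) := by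
    rfl
  rw [hget0]
  have hwnew : northLoadB (doCycleA grid) (n : Int)
      = calcWeightA (chunkOf ((doCycleA grid).flatten) w) := by
    rw [chunk_flatten _ hrect1 hw0 hn, weight_eq _ hrect1 hn, hrect1.1]
  have := loop_eq hn hw0 999999999 (doCycleA grid) [(doCycleA grid).flatten]
    ((doCycleA grid).flatten)
    (PySem.Dict.empty.insert ((doCycleA grid).flatten) 0)
    [northLoadB (doCycleA grid) (n : Int)]
    hrect1 rfl
    (by
      rw [PySem.Dict.items_insert_of_not_contains _ _ (by rfl)]
      rfl)
    (by rw [hwnew]; simp)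
  rw [hcyc]
  have hstep : (([((doCycleA grid)).flatten] : List (List Char)).length : Int) = 0 + 1 := by simp
  rw [hstep] at this
  exact this


-- ===== VERDICT (by name: the statement is the Claim_ definition above) =====
theorem part2_spec : Claim_equal_part2 := by
  intro data _ hpre
  exact part2_main data hpre
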